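-- pv_equiv track=rewrite | github.com/tonyyfeng/comp110-21f-workspace | exercises/ex06/dictionaries.py | count
-- ===== SOURCE A (Python) =====
-- def count(list_counted: list[str]) -> dict[str, int]:
--     """Given a list of strings, return a dictionary with how many times elements in that list are repeated."""
--     counter: dict[str, int] = dict()
--     for item in list_counted:
--         if item in counter:
--             counter[item] += 1
--         else:
--             counter[item] = 1
--     return counter
-- ===== SOURCE B (Python) =====
-- def count(list_counted: list[str]) -> dict[str, int]:
--     """Given a list of strings, return a dictionary with how many times elements in that list are repeated."""
--     srt = sorted(list_counted)
--     runs: list[tuple[str, int]] = []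
--     i, n = 0, len(srt)
--     while i < n:
--         j = i + 1
--         while j < n and srt[j] == srt[i]:
--             j += 1
--         runs.append((srt[i], j - i))
--         i = j
--     counts = dict(runs)
--     return {item: counts[item] for item in dict.fromkeys(list_counted)}
-- ===== Notes on version B (the rewrite author's own statement) =====
-- stated objective: alternative
-- what changed: Replaces the incremental hash-lookup-per-element counter dict with a sort-then-scan: sort the list, collect (value, run-length) pairs in one pass over consecutive runs, then emit the counts in first-occurrence order via dict.fromkeys.
import Mathlib
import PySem

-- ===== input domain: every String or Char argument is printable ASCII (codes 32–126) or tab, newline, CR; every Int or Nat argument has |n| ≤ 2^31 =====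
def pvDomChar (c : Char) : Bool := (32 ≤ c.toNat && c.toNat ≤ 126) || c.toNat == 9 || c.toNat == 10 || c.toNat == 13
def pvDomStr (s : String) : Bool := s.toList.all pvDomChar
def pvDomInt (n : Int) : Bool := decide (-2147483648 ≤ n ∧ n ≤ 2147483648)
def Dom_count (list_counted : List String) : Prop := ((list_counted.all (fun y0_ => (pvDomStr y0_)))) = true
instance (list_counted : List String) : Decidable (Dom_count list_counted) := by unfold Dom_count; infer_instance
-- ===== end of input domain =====

-- ===== PORT A =====
-- A: incremental counter dict — for each item, bump its entry if present, else insert 1.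
def count (list_counted : List String) : List (String × Int) :=
  (list_counted.foldl
    (fun counter item =>
      if counter.contains item then
        counter.insert item (counter.getD item 0 + 1)
      else
        counter.insert item 1)
    (PySem.Dict.empty : PySem.Dict String Int)).items

-- ===== PORT B =====
-- B: sort, scan the sorted list into (value, run-length) pairs — the inner 'while srt[j] == srt[i]'
-- scan of a run is the takeWhile, advancing i to j is the recursion on the dropWhile — then
-- reassemble in first-occurrence order (dict.fromkeys = dedup).
def runsB : List String → List (String × Int)
  | [] => []
  | x :: xs =>
      (x, (1 + (xs.takeWhile (fun y => y == x)).length : Int)) ::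
        runsB (xs.dropWhile (fun y => y == x))
termination_by s => s.length
decreasing_by
  simpa using Nat.lt_succ_of_le (List.Sublist.length_le (List.dropWhile_sublist _))

def count_alt (list_counted : List String) : List (String × Int) :=
  let srt := PySem.List.sorted list_counted (fun x => x) false
  let counts : PySem.Dict String Int := PySem.Dict.ofList (runsB srt)
  -- counts[item]: exact — every dedup key occurs in srt, hence is a key of counts (KeyError impossible)
  (PySem.List.dedup list_counted).map (fun item => (item, counts.getD item 0))

-- ===== PRECONDITION & SPEC =====
def Spec_count (list_counted : List String) (out : List (String × Int)) : Prop := out = count_alt list_counted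
instance (list_counted : List String) (out : List (String × Int)) : Decidable (Spec_count list_counted out) := by unfold Spec_count; infer_instance

-- ===== CLAIM (what is proved, stated in full; the proofs are below) =====
def Claim_equal_count : Prop := ∀ (list_counted : List String), Dom_count list_counted → Spec_count list_counted (count list_counted)

-- ===== LEMMAS AND PROOFS =====

-- A's loop body is exactly the 'd.insert x (d.getD x 0 + 1)' counter step (when x is absent, getD is 0).
theorem count_step_eq (d : PySem.Dict String Int) (x : String) :
    (if d.contains x then d.insert x (d.getD x 0 + 1) else d.insert x 1)
      = d.insert x (d.getD x 0 + 1) := by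
  by_cases h : d.contains x = true
  · simp [h]
  · have h0 : d.getD x 0 = 0 :=
      PySem.Dict.getD_of_not_contains d 0 (by simpa using h)
    simp [h, h0]

-- every key emitted by the run scan is an element of the scanned list
theorem runsB_mem (s : List String) (p : String × Int) (hp : p ∈ runsB s) : p.1 ∈ s := by
  induction s using runsB.induct with
  | case1 => simp [runsB] at hp
  | case2 x xs ih =>
    rw [runsB] at hp
    rcases List.mem_cons.mp hp with h | h
    · simp [h]
    · exact List.mem_cons_of_mem _
        (List.Sublist.subset (List.dropWhile_sublist _) (ih h))

-- in a (≤)-sorted list, the head does not reappear after its run is dropped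
theorem not_mem_dropWhile_of_sorted (x : String) (xs : List String)
    (hle : ∀ y ∈ xs, x ≤ y) (hp : xs.Pairwise (· ≤ ·)) :
    x ∉ xs.dropWhile (fun y => y == x) := by
  induction xs with
  | nil => simp
  | cons z zs ih =>
    by_cases hz : (z == x) = true
    · rw [List.dropWhile_cons, if_pos hz]
      exact ih (fun y hy => hle y (List.mem_cons_of_mem _ hy)) hp.of_cons
    · rw [List.dropWhile_cons, if_neg hz]
      have hzx : z ≠ x := by simpa using hz
      have hxz : x < z := lt_of_le_of_ne (hle z (by simp)) (Ne.symm hzx)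
      intro hmem
      rcases List.mem_cons.mp hmem with h | h
      · exact hzx h.symm
      · exact absurd (lt_of_lt_of_le hxz ((List.pairwise_cons.mp hp).1 x h)) (lt_irrefl x)

-- run keys of a sorted list are distinct
theorem runsB_keys_nodup (s : List String) (hs : s.Pairwise (· ≤ ·)) :
    ((runsB s).map Prod.fst).Nodup := by
  induction s using runsB.induct with
  | case1 => simp [runsB]
  | case2 x xs ih =>
    rw [runsB]
    have hcons := List.pairwise_cons.mp hs
    have hd : (xs.dropWhile (fun y => y == x)).Pairwise (· ≤ ·) :=
      hcons.2.sublist (List.dropWhile_sublist _)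
    refine List.nodup_cons.mpr ⟨?_, ih hd⟩
    intro hmem
    rcases List.mem_map.mp hmem with ⟨p, hp, hpx⟩
    have hx : p.1 = x := by simpa using hpx
    have hmem' := runsB_mem _ p hp
    rw [hx] at hmem'
    exact not_mem_dropWhile_of_sorted x xs hcons.1 hcons.2 hmem'

-- the run-length dict of a sorted list answers every count query
theorem runsB_getD (s : List String) (hs : s.Pairwise (· ≤ ·)) (k : String) :
    (PySem.Dict.mk (runsB s)).getD k 0 = (s.count k : Int) := by
  induction s using runsB.induct with
  | case1 => simp [runsB, PySem.Dict.getD, PySem.Dict.get?]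
  | case2 x xs ih =>
    have hcons := List.pairwise_cons.mp hs
    have hd : (xs.dropWhile (fun y => y == x)).Pairwise (· ≤ ·) :=
      hcons.2.sublist (List.dropWhile_sublist _)
    have hsplit : xs.takeWhile (fun y => y == x) ++ xs.dropWhile (fun y => y == x) = xs :=
      List.takeWhile_append_dropWhile
    have htake : ∀ y ∈ xs.takeWhile (fun y => y == x), y = x := by
      intro y hy
      simpa using List.mem_takeWhile_imp hy
    rw [runsB, PySem.Dict.getD_eq_get?_getD, PySem.Dict.get?_mk_cons]
    by_cases hk : (x == k) = true
    · have hxk : x = k := by simpa using hk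
      subst hxk
      have hnd : x ∉ xs.dropWhile (fun y => y == x) :=
        not_mem_dropWhile_of_sorted x xs hcons.1 hcons.2
      have hcx : xs.count x = (xs.takeWhile (fun y => y == x)).length := by
        conv_lhs => rw [← hsplit]
        rw [List.count_append, List.count_eq_zero.mpr hnd,
            List.count_eq_length.mpr (fun y hy => by simpa using (htake y hy).symm)]
        simp
      rw [if_pos hk, List.count_cons_self, hcx]
      simp [Int.add_comm]
    · have hxk : x ≠ k := by simpa using hk
      rw [if_neg (by simp [hk]), ← PySem.Dict.getD_eq_get?_getD, ih hd]
      have hct : (xs.takeWhile (fun y => y == x)).count k = 0 :=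
        List.count_eq_zero.mpr (fun hmem => hxk (htake k hmem).symm)
      rw [List.count_cons_of_ne hxk]
      conv_rhs => rw [← hsplit]
      rw [List.count_append, hct]
      simp

-- dict(runs) over distinct keys is literally the pair list
theorem ofList_runsB (s : List String) (hs : s.Pairwise (· ≤ ·)) :
    PySem.Dict.ofList (runsB s) = PySem.Dict.mk (runsB s) := by
  apply PySem.Dict.ext
  have h := PySem.Dict.items_foldl_insert_fresh (runsB s) Prod.fst Prod.snd
      (PySem.Dict.empty : PySem.Dict String Int)
      (fun a _ => PySem.Dict.contains_empty (ν := Int) a.1) (runsB_keys_nodup s hs)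
  simpa [PySem.Dict.ofList, PySem.Dict.empty] using h

-- ===== VERDICT (by name: the statement is the Claim_ definition above) =====
theorem count_spec : Claim_equal_count := by
  intro l _
  unfold Spec_count count count_alt
  have hstep :
      l.foldl
        (fun counter item =>
          if counter.contains item then
            counter.insert item (counter.getD item 0 + 1)
          else
            counter.insert item 1)
        (PySem.Dict.empty : PySem.Dict String Int)
        = l.foldl (fun d x => d.insert x (d.getD x 0 + 1)) PySem.Dict.empty := by
    apply PySem.List.foldl_congr_mem
    intro acc x _
    exact count_step_eq acc x
  rw [hstep, PySem.Dict.foldl_insert_getD_add_one_eq_counter, PySem.Dict.items_counter]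
  have hsorted : (PySem.List.sorted l (fun x => x) false).Pairwise (· ≤ ·) := by
    simpa using PySem.List.sorted_pairwise l (fun x => x)
  have hcount : ∀ k : String,
      (PySem.Dict.ofList (runsB (PySem.List.sorted l (fun x => x) false))).getD k 0
        = (l.count k : Int) := by
    intro k
    rw [ofList_runsB _ hsorted, runsB_getD _ hsorted,
        (PySem.List.sorted_perm l (fun x => x) false).count_eq]
  simp only [PySem.List.dedup_eq_ofList]
  exact (List.map_congr_left (fun k _ => by rw [hcount k])).symm
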